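-- pv_equiv track=rewrite | github.com/gsmprodata/Gsm_Project | Scripts/Code/2019/7_july/14-07-19/Abhishek/database_update.py | getDisplaySize
-- ===== SOURCE A (Python) =====
-- asciiList = {"zero": 48,"nine":57, "dot":46}
--
-- def getDisplaySize(displayString):
--     display = ''
--     for disChar in displayString:
--         if((ord(disChar)>= asciiList["zero"] and ord(disChar) <= asciiList["nine"]) or ord(disChar) == asciiList["dot"]):
--             display += disChar
--         else:
--             break
--     return display
-- ===== SOURCE B (Python) =====
-- import re
--
-- def getDisplaySize(displayString):
--     return re.match(r'[0-9.]*', displayString).group()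
-- ===== Notes on version B (the rewrite author's own statement) =====
-- stated objective: idiomatic
-- what changed: Replaced the explicit char-by-char loop with ord-range checks and break by a single anchored regex match of the maximal leading [0-9.]* run.
import Mathlib
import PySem

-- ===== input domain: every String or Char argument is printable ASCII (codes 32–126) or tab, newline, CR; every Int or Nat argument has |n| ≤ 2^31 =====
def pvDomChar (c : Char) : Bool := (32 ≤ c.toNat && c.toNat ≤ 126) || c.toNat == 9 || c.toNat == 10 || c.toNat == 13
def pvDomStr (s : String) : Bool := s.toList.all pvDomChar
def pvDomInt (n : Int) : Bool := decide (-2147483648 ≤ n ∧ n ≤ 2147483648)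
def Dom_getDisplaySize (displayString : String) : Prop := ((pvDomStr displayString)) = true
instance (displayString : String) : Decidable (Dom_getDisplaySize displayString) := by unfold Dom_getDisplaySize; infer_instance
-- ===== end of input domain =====

-- B replaces A's explicit char loop with break by an anchored regex match of the maximal leading [0-9.]* run (idiomatic; same cost).

-- ===== PORT A =====
-- A: accumulate chars while in digit/dot range, break on first non-match (literal loop with break).
def pvAsciiList : PySem.Dict String Int :=
  (PySem.Dict.empty.insert "zero" 48 |>.insert "nine" 57 |>.insert "dot" 46)

def getDisplaySizeLoop (display : List Char) : List Char → List Char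
  | [] => display
  | disChar :: rest =>
      if (pvAsciiList.getD "zero" 0 ≤ (disChar.toNat : Int) ∧ (disChar.toNat : Int) ≤ pvAsciiList.getD "nine" 0)
         ∨ (disChar.toNat : Int) = pvAsciiList.getD "dot" 0 then
        getDisplaySizeLoop (display ++ [disChar]) rest
      else
        display

def getDisplaySize (displayString : String) : String :=
  String.ofList (getDisplaySizeLoop [] displayString.toList)

-- ===== PORT B =====
-- B: re.match(r'[0-9.]*', s).group() = maximal leading run of [0-9.] = takeWhile.
def pvIsDigitOrDot (c : Char) : Bool := ('0' ≤ c && c ≤ '9') || c == '.'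

def getDisplaySize_alt (displayString : String) : String :=
  String.ofList (displayString.toList.takeWhile pvIsDigitOrDot)

-- ===== PRECONDITION & SPEC =====
def Spec_getDisplaySize (displayString : String) (out : String) : Prop := out = getDisplaySize_alt displayString
instance (displayString : String) (out : String) : Decidable (Spec_getDisplaySize displayString out) := by unfold Spec_getDisplaySize; infer_instance

-- ===== CLAIM (what is proved, stated in full; the proofs are below) =====
def Claim_equal_getDisplaySize : Prop := ∀ (displayString : String), Dom_getDisplaySize displayString → Spec_getDisplaySize displayString (getDisplaySize displayString)

-- ===== LEMMAS AND PROOFS =====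
lemma char_le_iff (c : Char) : ('0' ≤ c) ↔ 48 ≤ c.toNat := by
  rw [Char.le_def, UInt32.le_iff_toNat_le]; exact Iff.rfl

lemma char_le_iff' (c : Char) : (c ≤ '9') ↔ c.toNat ≤ 57 := by
  rw [Char.le_def, UInt32.le_iff_toNat_le]; exact Iff.rfl

lemma char_eq_dot_iff (c : Char) : (c = '.') ↔ c.toNat = 46 := by
  rw [Char.ext_iff, ← UInt32.toNat_inj]; exact Iff.rfl

lemma cond_iff (c : Char) :
    ((pvAsciiList.getD "zero" 0 ≤ (c.toNat : Int) ∧ (c.toNat : Int) ≤ pvAsciiList.getD "nine" 0)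
      ∨ (c.toNat : Int) = pvAsciiList.getD "dot" 0) ↔ pvIsDigitOrDot c = true := by
  have hz : pvAsciiList.getD "zero" 0 = 48 := by decide
  have hn : pvAsciiList.getD "nine" 0 = 57 := by decide
  have hd : pvAsciiList.getD "dot" 0 = 46 := by decide
  rw [hz, hn, hd]
  simp only [pvIsDigitOrDot, Bool.or_eq_true, Bool.and_eq_true, decide_eq_true_eq, beq_iff_eq,
    char_le_iff, char_le_iff', char_eq_dot_iff]
  omega

lemma loop_eq (cs : List Char) : ∀ acc, getDisplaySizeLoop acc cs = acc ++ cs.takeWhile pvIsDigitOrDot := by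
  induction cs with
  | nil => intro acc; simp [getDisplaySizeLoop]
  | cons c rest ih =>
      intro acc
      by_cases h : pvIsDigitOrDot c
      · simp [getDisplaySizeLoop, (cond_iff c).mpr h, ih, List.takeWhile, h]
      · have hc := (cond_iff c).not.mpr (by simpa using h)
        simp [getDisplaySizeLoop, hc, List.takeWhile, h]

-- ===== VERDICT (by name: the statement is the Claim_ definition above) =====
theorem getDisplaySize_spec : Claim_equal_getDisplaySize := by
  intro s _
  unfold Spec_getDisplaySize getDisplaySize getDisplaySize_alt
  rw [loop_eq]
  simp
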